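-- pv_equiv track=rewrite | github.com/christianThardy/Partial-Attention-Language-Model | palm/evaluation/context_rot.py | generate_distractors
-- ===== SOURCE A (Python) =====
-- from typing import List, Dict, Optional, Tuple, Any
--
-- def generate_distractors(needle: Dict, num_distractors: int = 4) -> List[str]:
--     """Generate distractors that are similar but incorrect."""
--     distractors = []
--
--     if "code" in needle["needle"].lower():
--         codes = ["8531", "2947", "6183", "9024"]
--         for code in codes[:num_distractors]:
--             distractors.append(f"The backup code for the storage is {code}.")
--
--     elif "meeting" in needle["needle"].lower():
--         variants = [
--             "The conference is planned for Monday at 2pm in Room 105.",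
--             "The workshop was held on Wednesday at 4pm in the main hall.",
--             "The review session is set for Friday at 10am in Room 302.",
--             "The standup happens daily at 9am in the open area.",
--         ]
--         distractors = variants[:num_distractors]
--
--     elif "superconductor" in needle["needle"].lower():
--         variants = [
--             "Prof. Michael Lee published groundbreaking work on semiconductors in 2018.",
--             "The low-temperature superconductor was theorized by Dr. James Wong in 2020.",
--             "Dr. Sarah Chen's earlier work on insulators was completed in 2015.",
--             "The research team at MIT announced a superconductor breakthrough in 2021.",
--         ]
--         distractors = variants[:num_distractors]
--
--     elif "writing" in needle["needle"].lower():
--         variants = [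
--             "My professor always said the key to good writing is reading extensively every day.",
--             "A famous author once mentioned that writing in the morning produces the best work.",
--             "The worst writing tip I received was to edit while writing the first draft.",
--             "My high school teacher recommended writing for at least two hours daily.",
--         ]
--         distractors = variants[:num_distractors]
--
--     elif "financial" in needle["needle"].lower() or "revenue" in needle["question"].lower():
--         variants = [
--             "The domestic operations showed a revenue of 52 million this quarter.",
--             "Last year's European contribution was 41 million with Asia at 35 million.",
--             "Projected international revenue for next quarter is estimated at 90 million.",
--             "The financial audit noted discrepancies of 3 million in the Asian accounts.",
--         ]
--         distractors = variants[:num_distractors]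
--
--     elif "temperature" in needle["needle"].lower() or "thermal" in needle["needle"].lower():
--         variants = [
--             "The cooling system activates when ambient temperature reaches 75 degrees.",
--             "Previous models had a thermal limit of 90 degrees Celsius.",
--             "The stress test showed components failing at 95 degrees Celsius.",
--             "Optimal performance occurs between 60 and 70 degrees Celsius.",
--         ]
--         distractors = variants[:num_distractors]
--
--     else:
--         # Generic distractors
--         distractors = [
--             "This is some related but incorrect information.",
--             "Another piece of similar but wrong content.",
--             "Yet more plausible but inaccurate details.",
--             "Additional misleading but believable text.",
--         ][:num_distractors]
--
--     return distractors
-- ===== SOURCE B (Python) =====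
-- def generate_distractors(needle, num_distractors=4):
--     """Generate distractors that are similar but incorrect."""
--     # Exhaustive keyword scoring: collect category indices of ALL matching
--     # keywords, pick the minimum index (branch priority), index a variants table.
--     KEYWORDS = [("code", 0), ("meeting", 1), ("superconductor", 2), ("writing", 3),
--                 ("financial", 4), ("temperature", 5), ("thermal", 5)]
--     VARIANTS = [
--         ["The backup code for the storage is 8531.",
--          "The backup code for the storage is 2947.",
--          "The backup code for the storage is 6183.",
--          "The backup code for the storage is 9024."],
--         ["The conference is planned for Monday at 2pm in Room 105.",
--          "The workshop was held on Wednesday at 4pm in the main hall.",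
--          "The review session is set for Friday at 10am in Room 302.",
--          "The standup happens daily at 9am in the open area."],
--         ["Prof. Michael Lee published groundbreaking work on semiconductors in 2018.",
--          "The low-temperature superconductor was theorized by Dr. James Wong in 2020.",
--          "Dr. Sarah Chen's earlier work on insulators was completed in 2015.",
--          "The research team at MIT announced a superconductor breakthrough in 2021."],
--         ["My professor always said the key to good writing is reading extensively every day.",
--          "A famous author once mentioned that writing in the morning produces the best work.",
--          "The worst writing tip I received was to edit while writing the first draft.",
--          "My high school teacher recommended writing for at least two hours daily."],
--         ["The domestic operations showed a revenue of 52 million this quarter.",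
--          "Last year's European contribution was 41 million with Asia at 35 million.",
--          "Projected international revenue for next quarter is estimated at 90 million.",
--          "The financial audit noted discrepancies of 3 million in the Asian accounts."],
--         ["The cooling system activates when ambient temperature reaches 75 degrees.",
--          "Previous models had a thermal limit of 90 degrees Celsius.",
--          "The stress test showed components failing at 95 degrees Celsius.",
--          "Optimal performance occurs between 60 and 70 degrees Celsius."],
--         ["This is some related but incorrect information.",
--          "Another piece of similar but wrong content.",
--          "Yet more plausible but inaccurate details.",
--          "Additional misleading but believable text."],
--     ]
--     ntext = needle["needle"].lower()
--     qtext = needle.get("question", "").lower()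
--     hits = [cat for kw, cat in KEYWORDS if kw in ntext]
--     if "revenue" in qtext:
--         hits.append(4)
--     cat = min(hits, default=6)
--     return VARIANTS[cat][:num_distractors]
-- ===== Notes on version B (the rewrite author's own statement) =====
-- stated objective: alternative
-- what changed: Replaces the short-circuiting if/elif dispatch by exhaustive scoring: every keyword is tested, the category indices of all matches are collected and the minimum index (= branch priority) selects a row of a 7-row variants table; the backup-code strings are precomputed literals.
import Mathlib
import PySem

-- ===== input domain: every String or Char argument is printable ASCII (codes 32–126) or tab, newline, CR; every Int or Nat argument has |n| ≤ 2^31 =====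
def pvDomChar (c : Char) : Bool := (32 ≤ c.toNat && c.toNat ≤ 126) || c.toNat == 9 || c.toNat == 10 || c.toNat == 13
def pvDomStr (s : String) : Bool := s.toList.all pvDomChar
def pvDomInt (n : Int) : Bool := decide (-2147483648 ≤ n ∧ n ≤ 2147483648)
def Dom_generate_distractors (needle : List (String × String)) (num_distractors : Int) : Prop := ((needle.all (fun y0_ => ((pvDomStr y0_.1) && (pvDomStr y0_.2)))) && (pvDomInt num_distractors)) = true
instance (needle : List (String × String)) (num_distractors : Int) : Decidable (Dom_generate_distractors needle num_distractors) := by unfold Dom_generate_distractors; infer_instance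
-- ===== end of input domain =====

-- B replaces A's short-circuit if/elif dispatch by exhaustive keyword scoring (collect all matching category indices, take the minimum, index a variants table); equivalence proved on inputs where A raises no KeyError.


-- ===== PORT A =====
-- needle["needle"] / needle["question"]: Dict.get? (none = KeyError, excluded by Pre_); .getD "" only totalises.
def generate_distractors (needle : List (String × String)) (num_distractors : Int) : List String :=
  let nl := PySem.Str.lower ((PySem.Dict.get? ⟨needle⟩ "needle").getD "")
  if PySem.Str.isIn "code" nl then
    (PySem.List.slice ["8531", "2947", "6183", "9024"] none (some num_distractors)).foldl
      (fun distractors code => distractors ++ ["The backup code for the storage is " ++ code ++ "."]) []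
  else if PySem.Str.isIn "meeting" nl then
    PySem.List.slice
      ["The conference is planned for Monday at 2pm in Room 105.",
       "The workshop was held on Wednesday at 4pm in the main hall.",
       "The review session is set for Friday at 10am in Room 302.",
       "The standup happens daily at 9am in the open area."] none (some num_distractors)
  else if PySem.Str.isIn "superconductor" nl then
    PySem.List.slice
      ["Prof. Michael Lee published groundbreaking work on semiconductors in 2018.",
       "The low-temperature superconductor was theorized by Dr. James Wong in 2020.",
       "Dr. Sarah Chen's earlier work on insulators was completed in 2015.",
       "The research team at MIT announced a superconductor breakthrough in 2021."] none (some num_distractors)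
  else if PySem.Str.isIn "writing" nl then
    PySem.List.slice
      ["My professor always said the key to good writing is reading extensively every day.",
       "A famous author once mentioned that writing in the morning produces the best work.",
       "The worst writing tip I received was to edit while writing the first draft.",
       "My high school teacher recommended writing for at least two hours daily."] none (some num_distractors)
  else if PySem.Str.isIn "financial" nl
       || PySem.Str.isIn "revenue" (PySem.Str.lower ((PySem.Dict.get? ⟨needle⟩ "question").getD "")) then
    PySem.List.slice
      ["The domestic operations showed a revenue of 52 million this quarter.",
       "Last year's European contribution was 41 million with Asia at 35 million.",
       "Projected international revenue for next quarter is estimated at 90 million.",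
       "The financial audit noted discrepancies of 3 million in the Asian accounts."] none (some num_distractors)
  else if PySem.Str.isIn "temperature" nl || PySem.Str.isIn "thermal" nl then
    PySem.List.slice
      ["The cooling system activates when ambient temperature reaches 75 degrees.",
       "Previous models had a thermal limit of 90 degrees Celsius.",
       "The stress test showed components failing at 95 degrees Celsius.",
       "Optimal performance occurs between 60 and 70 degrees Celsius."] none (some num_distractors)
  else
    PySem.List.slice
      ["This is some related but incorrect information.",
       "Another piece of similar but wrong content.",
       "Yet more plausible but inaccurate details.",
       "Additional misleading but believable text."] none (some num_distractors)

-- ===== PORT B =====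
-- Source B's KEYWORDS: keyword -> category index (branch priority = index)
def gdKeywords : List (String × Int) :=
  [("code", 0), ("meeting", 1), ("superconductor", 2), ("writing", 3),
   ("financial", 4), ("temperature", 5), ("thermal", 5)]

-- Source B's VARIANTS table (row 6 = generic)
def gdVariants : List (List String) :=
  [ ["The backup code for the storage is 8531.",
     "The backup code for the storage is 2947.",
     "The backup code for the storage is 6183.",
     "The backup code for the storage is 9024."],
    ["The conference is planned for Monday at 2pm in Room 105.",
     "The workshop was held on Wednesday at 4pm in the main hall.",
     "The review session is set for Friday at 10am in Room 302.",
     "The standup happens daily at 9am in the open area."],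
    ["Prof. Michael Lee published groundbreaking work on semiconductors in 2018.",
     "The low-temperature superconductor was theorized by Dr. James Wong in 2020.",
     "Dr. Sarah Chen's earlier work on insulators was completed in 2015.",
     "The research team at MIT announced a superconductor breakthrough in 2021."],
    ["My professor always said the key to good writing is reading extensively every day.",
     "A famous author once mentioned that writing in the morning produces the best work.",
     "The worst writing tip I received was to edit while writing the first draft.",
     "My high school teacher recommended writing for at least two hours daily."],
    ["The domestic operations showed a revenue of 52 million this quarter.",
     "Last year's European contribution was 41 million with Asia at 35 million.",
     "Projected international revenue for next quarter is estimated at 90 million.",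
     "The financial audit noted discrepancies of 3 million in the Asian accounts."],
    ["The cooling system activates when ambient temperature reaches 75 degrees.",
     "Previous models had a thermal limit of 90 degrees Celsius.",
     "The stress test showed components failing at 95 degrees Celsius.",
     "Optimal performance occurs between 60 and 70 degrees Celsius."],
    ["This is some related but incorrect information.",
     "Another piece of similar but wrong content.",
     "Yet more plausible but inaccurate details.",
     "Additional misleading but believable text."] ]

-- Source B: ntext = needle["needle"].lower(); qtext = needle.get("question","").lower();
-- hits = [cat for kw,cat in KEYWORDS if kw in ntext]; append 4 if "revenue" in qtext;
-- cat = min(hits, default=6); return VARIANTS[cat][:num_distractors]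
def generate_distractors_alt (needle : List (String × String)) (num_distractors : Int) : List String :=
  let ntext := PySem.Str.lower ((PySem.Dict.get? ⟨needle⟩ "needle").getD "")
  let qtext := PySem.Str.lower ((PySem.Dict.get? ⟨needle⟩ "question").getD "")
  let hits := (gdKeywords.filter (fun kc => PySem.Str.isIn kc.1 ntext)).map Prod.snd
  let hits := if PySem.Str.isIn "revenue" qtext then hits ++ [4] else hits
  let cat := (PySem.List.min? hits (fun x => x)).getD 6
  PySem.List.slice ((PySem.List.pyGet? gdVariants cat).getD []) none (some num_distractors)

-- ===== PRECONDITION & SPEC =====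
-- Pre_ excludes exactly the KeyError inputs of A: no "needle" key, or no "question" key while
-- none of the first five keywords matches (A then evaluates needle["question"]).
def Pre_generate_distractors (needle : List (String × String)) (num_distractors : Int) : Prop :=
  ((PySem.Dict.get? ⟨needle⟩ "needle").isSome
   && ((PySem.Dict.get? ⟨needle⟩ "question").isSome
       || ["code", "meeting", "superconductor", "writing", "financial"].any
            (fun k => PySem.Str.isIn k (PySem.Str.lower ((PySem.Dict.get? ⟨needle⟩ "needle").getD ""))))) = true
instance (needle : List (String × String)) (num_distractors : Int) : Decidable (Pre_generate_distractors needle num_distractors) := by unfold Pre_generate_distractors; infer_instance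

def pvWitness_generate_distractors : (List (String × String)) × Int := ([("needle", "the secret code"), ("question", "what?")], 2)

def Spec_generate_distractors (needle : List (String × String)) (num_distractors : Int) (out : List String) : Prop := out = generate_distractors_alt needle num_distractors
instance (needle : List (String × String)) (num_distractors : Int) (out : List String) : Decidable (Spec_generate_distractors needle num_distractors out) := by unfold Spec_generate_distractors; infer_instance

-- ===== CLAIM =====
def Claim_equal_generate_distractors : Prop := ∀ (needle : List (String × String)) (num_distractors : Int), Dom_generate_distractors needle num_distractors → Pre_generate_distractors needle num_distractors → Spec_generate_distractors needle num_distractors (generate_distractors needle num_distractors)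
-- ===== LEMMAS AND PROOFS =====

-- A's backup-code append loop over the sliced codes builds exactly row 0 of gdVariants, sliced
theorem code_loop_eq (num : Int) :
    (PySem.List.slice ["8531", "2947", "6183", "9024"] none (some num)).foldl
        (fun distractors code => distractors ++ ["The backup code for the storage is " ++ code ++ "."])
        ([] : List String)
    = PySem.List.slice
        ["The backup code for the storage is 8531.",
         "The backup code for the storage is 2947.",
         "The backup code for the storage is 6183.",
         "The backup code for the storage is 9024."] none (some num) := by
  rw [PySem.List.foldl_append_singleton_eq_map]
  simp [PySem.List.slice, List.map_take]

-- ===== VERDICT =====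
theorem generate_distractors_spec : Claim_equal_generate_distractors := by
  intro needle num h1 h2
  clear h1 h2
  unfold Spec_generate_distractors generate_distractors generate_distractors_alt gdKeywords gdVariants
  simp only [code_loop_eq, List.filter_cons, List.filter_nil]
  generalize PySem.Str.isIn "code" (PySem.Str.lower ((PySem.Dict.get? ⟨needle⟩ "needle").getD "")) = b1
  generalize PySem.Str.isIn "meeting" (PySem.Str.lower ((PySem.Dict.get? ⟨needle⟩ "needle").getD "")) = b2
  generalize PySem.Str.isIn "superconductor" (PySem.Str.lower ((PySem.Dict.get? ⟨needle⟩ "needle").getD "")) = b3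
  generalize PySem.Str.isIn "writing" (PySem.Str.lower ((PySem.Dict.get? ⟨needle⟩ "needle").getD "")) = b4
  generalize PySem.Str.isIn "financial" (PySem.Str.lower ((PySem.Dict.get? ⟨needle⟩ "needle").getD "")) = b5
  generalize PySem.Str.isIn "temperature" (PySem.Str.lower ((PySem.Dict.get? ⟨needle⟩ "needle").getD "")) = b6
  generalize PySem.Str.isIn "thermal" (PySem.Str.lower ((PySem.Dict.get? ⟨needle⟩ "needle").getD "")) = b7
  generalize PySem.Str.isIn "revenue" (PySem.Str.lower ((PySem.Dict.get? ⟨needle⟩ "question").getD "")) = b8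
  cases b1 <;> cases b2 <;> cases b3 <;> cases b4 <;> cases b5 <;> cases b6 <;> cases b7 <;> cases b8 <;> rfl
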